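-- pv_equiv track=rewrite | github.com/kraziers26/igamer-bestbuy-scanner | bestbuy_scanner.py | _extract_product_line
-- ===== SOURCE A (Python) =====
-- def _extract_product_line(brand: str, description: str) -> str:
--     SKIP = {
--         "GAMING","LAPTOP","DESKTOP","COMPUTER","ALL","IN","ONE","MINI",
--         "NOTEBOOK","WINDOWS","SCREEN","TOUCH","DISPLAY","2025","2024","2023"
--     }
--     tokens = description.split()
--     parts = []
--     for token in tokens[1:6]:
--         clean = token.rstrip(".,;:")
--         if clean.upper() in SKIP:
--             break
--         if len(clean) >= 2:
--             parts.append(clean)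
--         if len(parts) >= 3:
--             break
--
--     if not parts:
--         return ""
--
--     desc_lower = description.lower()
--     if "gaming" in desc_lower and "desktop" in desc_lower:
--         parts.append("gaming desktop")
--     elif "gaming" in desc_lower:
--         parts.append("gaming laptop")
--     elif "all in one" in desc_lower:
--         parts.append("all-in-one")
--     elif "desktop" in desc_lower:
--         parts.append("desktop")
--     else:
--         parts.append("laptop")
--
--     return f"{brand} {' '.join(parts)}".strip()
-- ===== SOURCE B (Python) =====
-- def _extract_product_line(brand: str, description: str) -> str:
--     SKIP = {
--         "GAMING","LAPTOP","DESKTOP","COMPUTER","ALL","IN","ONE","MINI",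
--         "NOTEBOOK","WINDOWS","SCREEN","TOUCH","DISPLAY","2025","2024","2023"
--     }
--     dl = description.lower()
--     if "gaming" in dl and "desktop" in dl:
--         tag = "gaming desktop"
--     elif "gaming" in dl:
--         tag = "gaming laptop"
--     elif "all in one" in dl:
--         tag = "all-in-one"
--     elif "desktop" in dl:
--         tag = "desktop"
--     else:
--         tag = "laptop"
--
--     def body(tokens, window, cap):
--         # Joined model-name words from the first `window` tokens, at most `cap`
--         # of them; None when no word is collected before a SKIP word / the end.
--         if window == 0 or not tokens:
--             return None
--         clean = tokens[0].rstrip(".,;:")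
--         if clean.upper() in SKIP:
--             return None
--         if len(clean) < 2:
--             return body(tokens[1:], window - 1, cap)
--         if cap == 1:
--             return clean
--         rest = body(tokens[1:], window - 1, cap - 1)
--         return clean if rest is None else clean + " " + rest
--
--     model = body(description.split()[1:], 5, 3)
--     if model is None:
--         return ""
--     return (brand + " " + model + " " + tag).strip()
-- ===== Notes on version B (the rewrite author's own statement) =====
-- stated objective: alternative
-- what changed: B computes the suffix tag up front and replaces A's accumulator loop plus final join by one fused recursion with window/cap fuel counters that builds the joined model-name string directly (Optional return, no parts list, no slice, no join call).
import Mathlib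
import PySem

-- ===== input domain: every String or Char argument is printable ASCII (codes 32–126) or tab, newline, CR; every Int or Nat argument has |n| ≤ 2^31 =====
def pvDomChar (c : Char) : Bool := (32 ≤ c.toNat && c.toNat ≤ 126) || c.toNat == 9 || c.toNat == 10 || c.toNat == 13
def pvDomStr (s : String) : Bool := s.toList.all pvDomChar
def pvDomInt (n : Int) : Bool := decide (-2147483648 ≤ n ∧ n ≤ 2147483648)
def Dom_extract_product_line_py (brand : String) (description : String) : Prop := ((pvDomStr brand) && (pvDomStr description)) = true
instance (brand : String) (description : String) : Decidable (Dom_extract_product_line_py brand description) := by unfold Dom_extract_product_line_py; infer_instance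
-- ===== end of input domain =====

-- B computes the suffix tag first and then builds the joined model-name string directly by one
-- fused recursion with window/cap fuel counters (no parts list, no slice, no final join);
-- same results, similar cost (objective: alternative).

-- ===== PORT A =====
-- the SKIP set of the Python source (set-literal membership; order irrelevant)
def pvSKIP : List (List Char) :=
  ["GAMING".toList, "LAPTOP".toList, "DESKTOP".toList, "COMPUTER".toList, "ALL".toList,
   "IN".toList, "ONE".toList, "MINI".toList, "NOTEBOOK".toList, "WINDOWS".toList,
   "SCREEN".toList, "TOUCH".toList, "DISPLAY".toList, "2025".toList, "2024".toList, "2023".toList]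

-- token.rstrip(".,;:") — hand port of str.rstrip with explicit chars (no PySem rstrip-with-chars
-- primitive); exact: drops exactly the trailing characters among ".,;:"
def pvRstripPunct (cs : List Char) : List Char :=
  (cs.reverse.dropWhile (fun c => [ '.', ',', ';', ':' ].contains c)).reverse

-- clean.upper() in SKIP
def pvIsSkip (cs : List Char) : Bool := pvSKIP.contains (PySem.Chars.upper cs)

-- A's for-loop over tokens[1:6] with its two breaks, as structural recursion on (tokens, parts)
def pvLoopA : List (List Char) → List (List Char) → List (List Char)
  | [], parts => parts
  | t :: rest, parts =>
    let clean := pvRstripPunct t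
    if pvIsSkip clean then parts
    else
      let parts' := if 2 ≤ clean.length then parts ++ [clean] else parts
      if 3 ≤ parts'.length then parts' else pvLoopA rest parts'

def extract_product_line_py (brand : String) (description : String) : String :=
  let tokens := PySem.Chars.split₀ description.toList
  let parts := pvLoopA (PySem.List.slice tokens (some 1) (some 6)) []
  if parts = [] then ""
  else
    let dl := PySem.Chars.lower description.toList
    let tag : List Char :=
      if PySem.Chars.isIn "gaming".toList dl && PySem.Chars.isIn "desktop".toList dl then
        "gaming desktop".toList
      else if PySem.Chars.isIn "gaming".toList dl then "gaming laptop".toList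
      else if PySem.Chars.isIn "all in one".toList dl then "all-in-one".toList
      else if PySem.Chars.isIn "desktop".toList dl then "desktop".toList
      else "laptop".toList
    String.ofList (PySem.Chars.strip
      (brand.toList ++ ' ' :: PySem.Chars.join " ".toList (parts ++ [tag])))

-- ===== PORT B =====
-- B's inner recursion `body(tokens, window, cap)`: joined model words of the first `window`
-- tokens, at most `cap` of them; none when no word is collected
def pvBody : List (List Char) → Nat → Nat → Option (List Char)
  | _, 0, _ => none
  | [], _ + 1, _ => none
  | t :: rest, w + 1, cap =>
    let clean := pvRstripPunct t
    if pvIsSkip clean then none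
    else if clean.length < 2 then pvBody rest w cap
    else if cap = 1 then some clean
    else
      match pvBody rest w (cap - 1) with
      | none => some clean
      | some r => some (clean ++ ' ' :: r)

def extract_product_line_py_alt (brand : String) (description : String) : String :=
  let dl := PySem.Chars.lower description.toList
  let tag : List Char :=
    if PySem.Chars.isIn "gaming".toList dl && PySem.Chars.isIn "desktop".toList dl then
      "gaming desktop".toList
    else if PySem.Chars.isIn "gaming".toList dl then "gaming laptop".toList
    else if PySem.Chars.isIn "all in one".toList dl then "all-in-one".toList
    else if PySem.Chars.isIn "desktop".toList dl then "desktop".toList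
    else "laptop".toList
  match pvBody (PySem.List.slice (PySem.Chars.split₀ description.toList) (some 1) none) 5 3 with
  | none => ""
  | some model =>
    String.ofList (PySem.Chars.strip (brand.toList ++ ' ' :: model ++ ' ' :: tag))

-- ===== PRECONDITION & SPEC =====
def Spec_extract_product_line_py (brand : String) (description : String) (out : String) : Prop := out = extract_product_line_py_alt brand description
instance (brand : String) (description : String) (out : String) : Decidable (Spec_extract_product_line_py brand description out) := by unfold Spec_extract_product_line_py; infer_instance

-- ===== CLAIM =====
def Claim_equal_extract_product_line_py : Prop := ∀ (brand : String) (description : String), Dom_extract_product_line_py brand description → Spec_extract_product_line_py brand description (extract_product_line_py brand description)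

-- ===== LEMMAS AND PROOFS =====

-- proof-only abstraction: the list of collected model words (window already applied, cap explicit)
def pvParts : List (List Char) → Nat → List (List Char)
  | [], _ => []
  | t :: rest, cap =>
    let clean := pvRstripPunct t
    if pvIsSkip clean then []
    else if clean.length < 2 then pvParts rest cap
    else if cap = 1 then [clean]
    else clean :: pvParts rest (cap - 1)

-- A's loop equals the pvParts abstraction, generalized over the accumulator
theorem pvLoopA_eq (ts : List (List Char)) :
    ∀ parts : List (List Char), parts.length < 3 →
      pvLoopA ts parts = parts ++ pvParts ts (3 - parts.length) := by
  induction ts with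
  | nil => intro parts _; simp [pvLoopA, pvParts]
  | cons t rest ih =>
    intro parts hlt
    simp only [pvLoopA, pvParts]
    by_cases hs : pvIsSkip (pvRstripPunct t)
    · simp [hs]
    · simp only [hs, if_false, Bool.false_eq_true]
      by_cases hlen : 2 ≤ (pvRstripPunct t).length
      · have hnot : ¬ (pvRstripPunct t).length < 2 := by omega
        simp only [hlen, if_true, hnot, if_false]
        by_cases hcap : 3 ≤ (parts ++ [pvRstripPunct t]).length
        · have hl : parts.length = 2 := by simp at hcap ⊢; omega
          simp [hl]
        · have hlt' : (parts ++ [pvRstripPunct t]).length < 3 := by omega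
          have hne1 : ¬ (3 - parts.length = 1) := by simp at hcap; omega
          simp only [hcap, if_false]
          rw [ih _ hlt']
          have h2 : 3 - (parts ++ [pvRstripPunct t]).length = 3 - parts.length - 1 := by
            simp; omega
          have h3 : 2 - parts.length = 3 - parts.length - 1 := by omega
          simp [hne1, h3]
      · have hlt2 : (pvRstripPunct t).length < 2 := by omega
        have hnc : ¬ 3 ≤ parts.length := by omega
        simp only [if_neg hlen, if_neg hnc, if_pos hlt2]
        exact ih parts hlt

-- B's fused recursion equals "join the pvParts list" (none exactly when the list is empty)
theorem pvBody_eq (ts : List (List Char)) :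
    ∀ w cap : Nat, pvBody ts w cap =
      match pvParts (ts.take w) cap with
      | [] => none
      | l => some (PySem.Chars.join " ".toList l) := by
  induction ts with
  | nil => intro w cap; cases w <;> simp [pvBody, pvParts]
  | cons t rest ih =>
    intro w cap
    cases w with
    | zero => simp [pvBody, pvParts]
    | succ w =>
      simp only [List.take_succ_cons, pvBody, pvParts]
      by_cases hs : pvIsSkip (pvRstripPunct t)
      · simp [hs]
      · simp only [hs, if_false, Bool.false_eq_true]
        by_cases hlen : (pvRstripPunct t).length < 2
        · simp only [hlen, if_true]
          exact ih w cap
        · simp only [hlen, if_false]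
          by_cases hc1 : cap = 1
          · simp [hc1, PySem.Chars.join_singleton]
          · simp only [hc1, if_false]
            rw [ih w (cap - 1)]
            cases hp : pvParts (rest.take w) (cap - 1) with
            | nil => simp
            | cons b bs => simp [PySem.Chars.join_cons_cons]

-- slice bridges: description.split()[1:6] vs description.split()[1:]
theorem pvSlice16 (xs : List (List Char)) :
    PySem.List.slice xs (some 1) (some 6) = (xs.drop 1).take 5 := by simp [pysem]

theorem pvSlice1 (xs : List (List Char)) :
    PySem.List.slice xs (some 1) none = xs.drop 1 := by simp [pysem]

-- join with the tag appended splits off the tag (nonempty prefix)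
theorem pvJoin_append_tag (l : List (List Char)) (tag : List Char) (h : l ≠ []) :
    PySem.Chars.join " ".toList (l ++ [tag]) =
      PySem.Chars.join " ".toList l ++ ' ' :: tag := by
  induction l with
  | nil => exact absurd rfl h
  | cons a l ih =>
    cases l with
    | nil => simp [PySem.Chars.join_cons_cons, PySem.Chars.join_singleton]
    | cons b bs =>
      have ih' := ih (by simp)
      simp only [List.cons_append] at ih' ⊢
      rw [PySem.Chars.join_cons_cons, ih', PySem.Chars.join_cons_cons]
      simp

theorem extract_product_line_py_eq (brand description : String) :
    extract_product_line_py brand description = extract_product_line_py_alt brand description := by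
  simp only [extract_product_line_py, extract_product_line_py_alt, pvSlice16, pvSlice1]
  rw [pvLoopA_eq _ [] (by norm_num), pvBody_eq]
  simp only [List.nil_append, List.length_nil, Nat.sub_zero]
  cases hp : pvParts (((PySem.Chars.split₀ description.toList).drop 1).take 5) 3 with
  | nil => simp
  | cons p ps =>
    simp only [reduceCtorEq, if_false]
    rw [pvJoin_append_tag _ _ (by simp)]
    simp

-- ===== VERDICT =====
theorem extract_product_line_py_spec : Claim_equal_extract_product_line_py := by
  intro brand description _
  unfold Spec_extract_product_line_py
  exact extract_product_line_py_eq brand description
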